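-- pv_equiv track=rewrite | github.com/hj0202/DrinkingScanner | Django/DrinkingScanner/apiserver/views_pre.py | pre_combine_frequency
-- ===== SOURCE A (Python) =====
-- def pre_combine_frequency(number,frequency):
--     result_num = [] # 결과 number 리스트
--     result_fre = [] # 결과 frequency 리스트
--     fre = dict() # 연속되지 않은 같은 수의 frequency를 합치기 위한 dictionary
--
--     for i in range(len(number)):
--         fre[number[i]] = 0
--     for i in range(len(number)):
--         fre[number[i]] += frequency[i]
--     for n, f in fre.items():
--         result_num.append(n)
--         result_fre.append(f)
--
--     return result_num,result_fre
-- ===== SOURCE B (Python) =====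
-- def pre_combine_frequency(number, frequency):
--     # single pass: pos maps each number to its index in the result lists
--     result_num = []
--     result_fre = []
--     pos = {}
--     for i in range(len(number)):
--         n = number[i]
--         f = frequency[i]
--         if n in pos:
--             result_fre[pos[n]] += f
--         else:
--             pos[n] = len(result_num)
--             result_num.append(n)
--             result_fre.append(f)
--     return result_num, result_fre
-- ===== Notes on version B (the rewrite author's own statement) =====
-- stated objective: alternative
-- what changed: A makes three passes (zero-initialise a dict over all numbers, accumulate into it, then unpack items into two lists); B makes a single pass that maintains the two result lists directly, using a dict mapping each number to its index in them.
import Mathlib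
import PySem

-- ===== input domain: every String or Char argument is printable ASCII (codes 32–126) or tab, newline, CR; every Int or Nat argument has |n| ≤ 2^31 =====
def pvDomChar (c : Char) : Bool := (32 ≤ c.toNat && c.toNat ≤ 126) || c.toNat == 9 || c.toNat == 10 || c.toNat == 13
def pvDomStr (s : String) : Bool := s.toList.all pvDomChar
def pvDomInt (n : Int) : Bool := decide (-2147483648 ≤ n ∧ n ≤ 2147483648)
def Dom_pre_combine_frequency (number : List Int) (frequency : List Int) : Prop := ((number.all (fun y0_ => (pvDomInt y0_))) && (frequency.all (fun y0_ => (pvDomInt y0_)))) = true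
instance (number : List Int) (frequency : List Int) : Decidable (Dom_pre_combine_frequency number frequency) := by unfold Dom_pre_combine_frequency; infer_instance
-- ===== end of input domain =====

-- B replaces A's three passes (zero-init dict, accumulate, unpack items) by one pass keeping the
-- two result lists directly plus an index dict; same cost class, different decomposition.

-- ===== PORT A =====
-- number[i] / frequency[i]: indices are 0 ≤ i < len(number) so they are in range for number, and in
-- range for frequency under Pre_; pyGetD with default 0 is exact there.
def pre_combine_frequency (number : List Int) (frequency : List Int) : List Int × List Int :=
  let fre0 : PySem.Dict Int Int := PySem.Dict.empty
  let fre1 := (PySem.List.pyRange 0 (PySem.List.len number)).foldl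
      (fun d i => d.insert (PySem.List.pyGetD number i 0) 0) fre0
  let fre2 := (PySem.List.pyRange 0 (PySem.List.len number)).foldl
      (fun d i => d.modify (PySem.List.pyGetD number i 0) 0
        (fun v => v + PySem.List.pyGetD frequency i 0)) fre1
  fre2.items.foldl (fun acc p => (acc.1 ++ [p.1], acc.2 ++ [p.2])) ([], [])

-- ===== PORT B =====
-- state = (result_num, result_fre, pos); 'result_fre[pos[n]] += f' is ported with List.set/getD,
-- exact here since pos[n] is always a valid non-negative index of result_fre.
def pre_combine_frequency_alt (number : List Int) (frequency : List Int) : List Int × List Int :=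
  let st := (PySem.List.pyRange 0 (PySem.List.len number)).foldl
    (fun (st : List Int × List Int × PySem.Dict Int Int) i =>
      let n := PySem.List.pyGetD number i 0
      let f := PySem.List.pyGetD frequency i 0
      match st.2.2.get? n with
      | some j => (st.1, st.2.1.set j.toNat (st.2.1.getD j.toNat 0 + f), st.2.2)
      | none => (st.1 ++ [n], st.2.1 ++ [f], st.2.2.insert n (PySem.List.len st.1)))
    ([], [], PySem.Dict.empty)
  (st.1, st.2.1)

-- ===== PRECONDITION & SPEC =====
-- Pre_ excludes exactly the inputs where A raises IndexError (frequency shorter than number); B raises there too.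
def Pre_pre_combine_frequency (number : List Int) (frequency : List Int) : Prop :=
  number.length ≤ frequency.length
instance (number : List Int) (frequency : List Int) : Decidable (Pre_pre_combine_frequency number frequency) := by unfold Pre_pre_combine_frequency; infer_instance
def pvWitness_pre_combine_frequency : List Int × List Int := ([1, 2, 1], [3, 4, 5])

def Spec_pre_combine_frequency (number : List Int) (frequency : List Int) (out : List Int × List Int) : Prop := out = pre_combine_frequency_alt number frequency
instance (number : List Int) (frequency : List Int) (out : List Int × List Int) : Decidable (Spec_pre_combine_frequency number frequency out) := by unfold Spec_pre_combine_frequency; infer_instance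

-- ===== CLAIM (what is proved, stated in full; the proofs are below) =====
def Claim_equal_pre_combine_frequency : Prop := ∀ (number : List Int) (frequency : List Int), Dom_pre_combine_frequency number frequency → Pre_pre_combine_frequency number frequency → Spec_pre_combine_frequency number frequency (pre_combine_frequency number frequency)

-- ===== LEMMAS AND PROOFS =====

def pvSum (ps : List (Int × Int)) (k : Int) : Int :=
  ((ps.filter (fun p => p.1 == k)).map (·.2)).sum

def pvPos (ks : List Int) : PySem.Dict Int Int :=
  ks.zipIdx.foldl (fun d p => d.insert p.1 (p.2 : Int)) PySem.Dict.empty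

lemma set_add_of_mem {s : List Int} {x : Int} (h : x ∈ s) : PySem.Set.add s x = s := by
  simp [PySem.Set.add, PySem.Set.contains, h]

lemma set_add_of_not_mem {s : List Int} {x : Int} (h : x ∉ s) : PySem.Set.add s x = s ++ [x] := by
  simp [PySem.Set.add, PySem.Set.contains, h]

lemma set_update_of_subset : ∀ (l : List Int) (s : PySem.Set Int), (∀ x ∈ l, x ∈ s) →
    PySem.Set.update s l = s
  | [], s, _ => rfl
  | x :: l, s, h => by
    have : PySem.Set.add s x = s := set_add_of_mem (h x (by simp))
    show PySem.Set.update (PySem.Set.add s x) l = s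
    rw [this]
    exact set_update_of_subset l s (fun y hy => h y (by simp [hy]))

lemma ofList_append_singleton (xs : List Int) (x : Int) :
    PySem.Set.ofList (xs ++ [x]) = PySem.Set.add (PySem.Set.ofList xs) x := by
  rw [PySem.Set.ofList_eq_foldl, PySem.Set.ofList_eq_foldl, List.foldl_append]
  rfl

lemma pvSum_append_singleton (l : List (Int × Int)) (n f k : Int) :
    pvSum (l ++ [(n, f)]) k = pvSum l k + if n = k then f else 0 := by
  by_cases h : n = k <;> simp [pvSum, List.filter_append, h]

lemma pvSum_of_not_mem {l : List (Int × Int)} {n : Int} (h : n ∉ l.map Prod.fst) :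
    pvSum l n = 0 := by
  have : l.filter (fun p => p.1 == n) = [] := by
    rw [List.filter_eq_nil_iff]
    intro p hp
    simp only [beq_iff_eq]
    intro hpn
    exact h (List.mem_map.2 ⟨p, hp, hpn⟩)
  simp [pvSum, this]

lemma pvPos_items (ks : List Int) (h : ks.Nodup) :
    (pvPos ks).items = ks.zipIdx.map (fun p => (p.1, (p.2 : Int))) := by
  have := PySem.Dict.items_foldl_insert_fresh (l := ks.zipIdx) (k := Prod.fst)
    (v := fun p => (p.2 : Int)) (d := PySem.Dict.empty)
    (by intro a _; exact PySem.Dict.contains_empty _)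
    (by simpa using h)
  simpa [pvPos] using this

lemma pvPos_keys (ks : List Int) (h : ks.Nodup) : (pvPos ks).keys = ks := by
  show (pvPos ks).items.map Prod.fst = ks
  rw [pvPos_items ks h]
  rw [List.map_map]
  simp [Function.comp_def]

lemma pvPos_get?_of_not_mem {ks : List Int} {n : Int} (h : ks.Nodup) (hn : n ∉ ks) :
    (pvPos ks).get? n = none := by
  rw [PySem.Dict.get?_eq_none_iff_not_mem_keys, pvPos_keys ks h]
  exact hn

lemma pvPos_get?_of_mem {ks : List Int} {n : Int} (h : ks.Nodup) (hn : n ∈ ks) :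
    (pvPos ks).get? n = some ((List.idxOf n ks : Nat) : Int) := by
  apply PySem.Dict.get?_of_mem_items
  · rw [pvPos_items ks h]
    refine List.mem_map.2 ⟨(n, List.idxOf n ks), ?_, rfl⟩
    rw [List.mk_mem_zipIdx_iff_getElem?]
    rw [List.getElem?_eq_getElem (List.idxOf_lt_length_of_mem hn)]
    rw [List.getElem_idxOf]
  · show ((pvPos ks).items.map Prod.fst).Nodup
    rw [pvPos_items ks h, List.map_map]
    simpa [Function.comp_def] using h

lemma pvPos_append (ks : List Int) (n : Int) :
    pvPos (ks ++ [n]) = (pvPos ks).insert n (ks.length : Int) := by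
  unfold pvPos
  rw [List.zipIdx_append, List.foldl_append]
  simp

def pvStepB (st : List Int × List Int × PySem.Dict Int Int) (n f : Int) :
    List Int × List Int × PySem.Dict Int Int :=
  match st.2.2.get? n with
  | some j => (st.1, st.2.1.set j.toNat (st.2.1.getD j.toNat 0 + f), st.2.2)
  | none => (st.1 ++ [n], st.2.1 ++ [f], st.2.2.insert n (PySem.List.len st.1))

def pvState (done : List (Int × Int)) : List Int × List Int × PySem.Dict Int Int :=
  (PySem.Set.ofList (done.map Prod.fst),
   (PySem.Set.ofList (done.map Prod.fst)).map (pvSum done),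
   pvPos (PySem.Set.ofList (done.map Prod.fst)))

lemma stepB_state (done : List (Int × Int)) (n f : Int) :
    pvStepB (pvState done) n f = pvState (done ++ [(n, f)]) := by
  have hnd : (PySem.Set.ofList (done.map Prod.fst)).Nodup := PySem.Set.nodup_ofList _
  set ks := PySem.Set.ofList (done.map Prod.fst) with hks
  have hmapfst : (done ++ [(n, f)]).map Prod.fst = done.map Prod.fst ++ [n] := by simp
  by_cases hn : n ∈ ks
  · -- n already seen: update result_fre in place
    have hidx := List.idxOf_lt_length_of_mem hn
    have hget := pvPos_get?_of_mem hnd hn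
    have hks' : PySem.Set.ofList ((done ++ [(n, f)]).map Prod.fst) = ks := by
      rw [hmapfst, ofList_append_singleton, ← hks, set_add_of_mem hn]
    unfold pvStepB pvState
    rw [hmapfst] at *
    simp only [← hks, hget, hks']
    refine Prod.ext rfl (Prod.ext ?_ rfl)
    simp only [Int.toNat_natCast]
    -- list component
    apply List.ext_getElem
    · simp
    · intro i h1 h2
      rw [List.getElem_set]
      by_cases hi : List.idxOf n ks = i
      · subst hi
        rw [if_pos rfl]
        have hksn : ks[List.idxOf n ks] = n := List.getElem_idxOf hidx
        simp only [List.getElem_map] at *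
        rw [hksn, List.getD_eq_getElem _ _ (by simpa using h2)]
        simp only [List.getElem_map, hksn]
        rw [pvSum_append_singleton, if_pos rfl]
      · rw [if_neg hi]
        simp only [List.getElem_map]
        rw [pvSum_append_singleton, if_neg, add_zero]
        intro hcon
        apply hi
        have h2' : i < ks.length := by simpa using h2
        have : ks[List.idxOf n ks]'hidx = ks[i]'h2' := by rw [List.getElem_idxOf, hcon]
        exact (List.Nodup.getElem_inj_iff hnd).1 this
  · -- fresh n: append
    have hget := pvPos_get?_of_not_mem hnd hn
    have hks' : PySem.Set.ofList ((done ++ [(n, f)]).map Prod.fst) = ks ++ [n] := by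
      rw [hmapfst, ofList_append_singleton, ← hks, set_add_of_not_mem hn]
    unfold pvStepB pvState
    simp only [← hks, hget, hks']
    refine Prod.ext rfl (Prod.ext ?_ ?_)
    · -- fre list
      show ks.map (pvSum done) ++ [f] = (ks ++ [n]).map (pvSum (done ++ [(n, f)]))
      rw [List.map_append]
      congr 1
      · apply List.map_congr_left
        intro k hk
        rw [pvSum_append_singleton, if_neg, add_zero]
        intro hcon; subst hcon; exact hn hk
      · have hnin : n ∉ done.map Prod.fst := by
          intro hc; exact hn ((PySem.Set.mem_ofList _ _).2 hc)
        simp only [List.map_cons, List.map_nil]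
        rw [pvSum_append_singleton, if_pos rfl, pvSum_of_not_mem hnin, zero_add]
    · show (pvPos ks).insert n (PySem.List.len ks) = pvPos (ks ++ [n])
      rw [pvPos_append]
      rfl

lemma B_loop : ∀ (l done : List (Int × Int)),
    l.foldl (fun st p => pvStepB st p.1 p.2) (pvState done) = pvState (done ++ l)
  | [], done => by simp
  | p :: l, done => by
    rw [List.foldl_cons, show pvStepB (pvState done) p.1 p.2 = pvState (done ++ [p]) from
      stepB_state done p.1 p.2, B_loop l (done ++ [p])]
    simp

lemma getD_insert0_loop : ∀ (l : List Int) (d : PySem.Dict Int Int),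
    (∀ k, d.getD k 0 = 0) → ∀ k, (l.foldl (fun d n => d.insert n (0 : Int)) d).getD k 0 = 0
  | [], d, hd, k => hd k
  | x :: l, d, hd, k => by
    rw [List.foldl_cons]
    refine getD_insert0_loop l _ (fun k' => ?_) k
    rw [PySem.Dict.getD_insert]
    split_ifs with h
    · rfl
    · exact hd k'

lemma getD_modify_sum : ∀ (l : List (Int × Int)) (d : PySem.Dict Int Int) (k : Int),
    (l.foldl (fun d p => d.modify p.1 0 (fun v => v + p.2)) d).getD k 0 = d.getD k 0 + pvSum l k
  | [], d, k => by simp [pvSum]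
  | p :: l, d, k => by
    rw [List.foldl_cons, getD_modify_sum l _ k, PySem.Dict.getD_modify]
    have : pvSum (p :: l) k = (if p.1 = k then p.2 else 0) + pvSum l k := by
      by_cases h : p.1 = k <;> simp [pvSum, h]
    rw [this]
    by_cases h : k = p.1
    · rw [if_pos h, if_pos h.symm]; subst h; ring
    · rw [if_neg h, if_neg (fun hc => h hc.symm)]; ring

lemma foldl_idx2 {β : Type} (f : β → Int → Int → β) :
    ∀ (number frequency : List Int) (init : β), number.length ≤ frequency.length →
    (PySem.List.pyRange 0 (PySem.List.len number)).foldl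
        (fun acc i => f acc (PySem.List.pyGetD number i 0) (PySem.List.pyGetD frequency i 0)) init
      = (number.zip frequency).foldl (fun acc p => f acc p.1 p.2) init := by
  intro number frequency init h
  have hlen : PySem.List.len number = (number.length : Int) := rfl
  rw [hlen, PySem.List.pyRange_zero_natCast, List.foldl_map]
  simp only [PySem.List.pyGetD_natCast]
  induction number generalizing frequency init with
  | nil => simp
  | cons x xs ih =>
    cases frequency with
    | nil => simp at h
    | cons y ys =>
      rw [List.length_cons, List.range_succ_eq_map]
      simp only [List.foldl_cons, List.foldl_map, List.getD_cons_zero, List.getD_cons_succ,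
        Nat.succ_eq_add_one, List.zip_cons_cons]
      exact ih ys (f init x y) (by simpa using h) rfl

lemma A_eq (number frequency : List Int) (h : number.length ≤ frequency.length) :
    pre_combine_frequency number frequency
      = (PySem.Set.ofList number,
         (PySem.Set.ofList number).map (pvSum (number.zip frequency))) := by
  simp only [pre_combine_frequency]
  have h1 : (PySem.List.pyRange 0 (PySem.List.len number)).foldl
      (fun d i => d.insert (PySem.List.pyGetD number i 0) 0) PySem.Dict.empty
      = number.foldl (fun d n => d.insert n (0 : Int)) PySem.Dict.empty := by
    simpa using PySem.List.foldl_pyRange_pyGetD number 0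
      (fun d n => d.insert n (0 : Int)) PySem.Dict.empty (a := 0) (le_refl 0)
  rw [h1]
  have h2 : (PySem.List.pyRange 0 (PySem.List.len number)).foldl
      (fun d i => d.modify (PySem.List.pyGetD number i 0) 0
        (fun v => v + PySem.List.pyGetD frequency i 0))
      (number.foldl (fun d n => d.insert n (0 : Int)) PySem.Dict.empty)
      = (number.zip frequency).foldl (fun d p => d.modify p.1 0 (fun v => v + p.2))
        (number.foldl (fun d n => d.insert n (0 : Int)) PySem.Dict.empty) :=
    foldl_idx2 (fun (d : PySem.Dict Int Int) n fv => d.modify n 0 (fun v => v + fv)) number frequency _ h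
  rw [h2]
  set fre1 := number.foldl (fun d n => d.insert n (0 : Int)) PySem.Dict.empty with hfre1
  set fre2 := (number.zip frequency).foldl (fun d p => d.modify p.1 0 (fun v => v + p.2)) fre1
    with hfre2
  have hk1 : fre1.keys = PySem.Set.ofList number := by
    have := PySem.Dict.keys_foldl_insert number (fun _ _ => (0 : Int)) PySem.Dict.empty
    simpa [PySem.Dict.keys_empty, PySem.Set.update, ← PySem.Set.ofList_eq_foldl] using this
  have hg1 : ∀ k, fre1.getD k 0 = 0 :=
    getD_insert0_loop number PySem.Dict.empty (fun k => by simp)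
  have hk2 : fre2.keys = PySem.Set.ofList number := by
    have := PySem.Dict.keys_foldl_modify_key (number.zip frequency) Prod.fst (0 : Int)
      (fun _ p v => v + p.2) fre1
    rw [hfre2, this, hk1, List.map_fst_zip h]
    exact set_update_of_subset number _ (fun x hx => (PySem.Set.mem_ofList number x).2 hx)
  have hnd2 : fre2.keys.Nodup := by rw [hk2]; exact PySem.Set.nodup_ofList _
  have hitems : fre2.items
      = (PySem.Set.ofList number).map (fun k => (k, pvSum (number.zip frequency) k)) := by
    rw [PySem.Dict.items_eq_map_keys fre2 hnd2 0, hk2]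
    apply List.map_congr_left
    intro k _
    rw [hfre2, getD_modify_sum, hg1 k, zero_add]
  rw [PySem.List.foldl_prod_mk (f := fun acc (p : Int × Int) => acc ++ [p.1])
    (g := fun acc (p : Int × Int) => acc ++ [p.2]),
    PySem.List.foldl_append_singleton_eq_map (fun p : Int × Int => p.1),
    PySem.List.foldl_append_singleton_eq_map (fun p : Int × Int => p.2), hitems]
  simp [List.map_map, Function.comp_def]

lemma B_eq (number frequency : List Int) (h : number.length ≤ frequency.length) :
    pre_combine_frequency_alt number frequency
      = (PySem.Set.ofList number,
         (PySem.Set.ofList number).map (pvSum (number.zip frequency))) := by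
  simp only [pre_combine_frequency_alt]
  have h1 : (PySem.List.pyRange 0 (PySem.List.len number)).foldl
      (fun (st : List Int × List Int × PySem.Dict Int Int) i =>
        let n := PySem.List.pyGetD number i 0
        let f := PySem.List.pyGetD frequency i 0
        match st.2.2.get? n with
        | some j => (st.1, st.2.1.set j.toNat (st.2.1.getD j.toNat 0 + f), st.2.2)
        | none => (st.1 ++ [n], st.2.1 ++ [f], st.2.2.insert n (PySem.List.len st.1)))
      ([], [], PySem.Dict.empty)
      = (number.zip frequency).foldl (fun st p => pvStepB st p.1 p.2)
        ([], [], PySem.Dict.empty) :=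
    foldl_idx2 pvStepB number frequency _ h
  rw [h1]
  have h0 : (([], [], PySem.Dict.empty) : List Int × List Int × PySem.Dict Int Int)
      = pvState [] := rfl
  rw [h0, B_loop (number.zip frequency) [], List.nil_append]
  simp only [pvState]
  rw [List.map_fst_zip h]

-- ===== VERDICT (by name: the statement is the Claim_ definition above) =====
theorem pre_combine_frequency_spec : Claim_equal_pre_combine_frequency := by
  intro number frequency _ hpre
  unfold Spec_pre_combine_frequency
  rw [A_eq number frequency hpre, B_eq number frequency hpre]
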